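-- pv_equiv track=rewrite | github.com/TomWagg/advent-of-code | 2021/python/24.py | find_model_number
-- ===== SOURCE A (Python) =====
-- def reduced_function(z_prev, w, constants):
--     """ The function that acts on each w input to produce the new z value """
--     if w == (z_prev % 26 + constants[1]):
--         return z_prev // constants[0]
--     else:
--         return 26 * (z_prev // constants[0]) + w + constants[2]
--
-- def find_model_number(constants, z_prev=0, model_number=()):
--     """ Recursively add to the model number until you find one that works and return it """
--     # once there are no constants left
--     if constants == []:
--         # return the resulting model number if it is a solution, otherwise None
--         return model_number if z_prev == 0 else None
--
--     # separate the constants for this step and future steps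
--     this_step, next_steps = constants[0], constants[1:]
--
--     # first make an early exit condition
--     # if the previous z is divided by 26 instead of 1 then it limits the possible values
--     if this_step[0] == 26:
--         # in this case, the *only* allowable w is the following
--         w = (z_prev % 26) + this_step[1]
--
--         # if this w is out of the range then return nothing
--         if w <= 0 or w >= 10:
--             return None
--
--         # otherwise return the new values
--         return find_model_number(constants=next_steps, z_prev=z_prev // this_step[0],
--                                  model_number=model_number + (w,))
--
--     # check every possible model number
--     for w in reversed(range(1, 10)):
--         guessed_number = find_model_number(constants=next_steps,
--                                            z_prev=reduced_function(z_prev, w, this_step),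
--                                            model_number=model_number+(w,))
--         if guessed_number is not None:
--             return guessed_number
-- ===== SOURCE B (Python) =====
-- def find_model_number(constants, z_prev=0, model_number=()):
--     """Memoized DP over (step index, z value): each distinct (i, z) suffix is solved once."""
--     n = len(constants)
--     memo = {}
--
--     def solve(i, z):
--         if i == n:
--             return () if z == 0 else None
--         key = (i, z)
--         if key in memo:
--             return memo[key]
--         c = constants[i]
--         if c[0] == 26:
--             w = z % 26 + c[1]
--             if w <= 0 or w >= 10:
--                 res = None
--             else:
--                 tail = solve(i + 1, z // c[0])
--                 res = None if tail is None else (w,) + tail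
--         else:
--             res = None
--             for w in range(9, 0, -1):
--                 if w == z % 26 + c[1]:
--                     z_next = z // c[0]
--                 else:
--                     z_next = 26 * (z // c[0]) + w + c[2]
--                 tail = solve(i + 1, z_next)
--                 if tail is not None:
--                     res = (w,) + tail
--                     break
--         memo[key] = res
--         return res
--
--     suffix = solve(0, z_prev)
--     return None if suffix is None else tuple(model_number) + suffix
-- ===== Notes on version B (the rewrite author's own statement) =====
-- stated objective: faster
-- what changed: A's plain depth-first search over digit choices is replaced by a memoized (dynamic-programming) search: suffix results are cached in a dict keyed on (step index, z value), so each reachable state is solved once and the accumulator is replaced by building the suffix back-to-front.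
-- outside the precondition, e.g. on find_model_number([(26, 100), (0,)], 0, ()): A returns None, B returns None
import Mathlib
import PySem

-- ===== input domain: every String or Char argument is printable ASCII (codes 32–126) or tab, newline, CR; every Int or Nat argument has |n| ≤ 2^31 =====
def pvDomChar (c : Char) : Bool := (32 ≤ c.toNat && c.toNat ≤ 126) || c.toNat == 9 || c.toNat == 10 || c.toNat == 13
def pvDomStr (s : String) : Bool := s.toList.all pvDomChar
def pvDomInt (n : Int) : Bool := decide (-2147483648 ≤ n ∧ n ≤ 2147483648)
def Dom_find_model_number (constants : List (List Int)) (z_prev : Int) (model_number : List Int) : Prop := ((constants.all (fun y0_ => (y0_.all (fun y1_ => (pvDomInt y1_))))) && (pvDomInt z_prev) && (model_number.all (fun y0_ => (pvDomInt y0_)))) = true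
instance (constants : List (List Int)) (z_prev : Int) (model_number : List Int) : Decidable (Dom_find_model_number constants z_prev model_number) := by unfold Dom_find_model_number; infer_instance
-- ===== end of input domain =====

-- B replaces A's plain depth-first search by a memoized search keyed on (step index, z value),
-- solving each distinct suffix state once (objective: faster). Return value only; no mutation.

-- ===== PORT A =====
def reduced_function (z_prev : Int) (w : Int) (constants : List Int) : Int :=
  if w = PySem.Int.mod z_prev 26 + PySem.List.pyGetD constants 1 0 then
    PySem.Int.floordiv z_prev (PySem.List.pyGetD constants 0 0)
  else
    26 * PySem.Int.floordiv z_prev (PySem.List.pyGetD constants 0 0) + w + PySem.List.pyGetD constants 2 0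

-- the 'for w in …' loop of A; `f` is the recursive call on the remaining steps
def fmnLoopA (f : Int → List Int → Option (List Int)) (this_step : List Int) (z_prev : Int)
    (model_number : List Int) : List Int → Option (List Int)
  | [] => none
  | w :: ws =>
    match f (reduced_function z_prev w this_step) (model_number ++ [w]) with
    | some guessed_number => some guessed_number
    | none => fmnLoopA f this_step z_prev model_number ws

def find_model_number (constants : List (List Int)) (z_prev : Int) (model_number : List Int) : Option (List Int) :=
  match constants with
  | [] => if z_prev = 0 then some model_number else none
  | this_step :: next_steps =>
    if PySem.List.pyGetD this_step 0 0 = 26 then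
      let w := PySem.Int.mod z_prev 26 + PySem.List.pyGetD this_step 1 0
      if w ≤ 0 ∨ 10 ≤ w then none
      else find_model_number next_steps (PySem.Int.floordiv z_prev (PySem.List.pyGetD this_step 0 0)) (model_number ++ [w])
    else
      -- for w in reversed(range(1, 10)): …
      fmnLoopA (fun z' mn' => find_model_number next_steps z' mn') this_step z_prev model_number
        ((PySem.List.pyRange 1 10 1).reverse)

-- ===== PORT B =====
-- the 'for w in …' loop of B; `f` is the memoized recursive call on the remaining steps, threading the memo
def fmnLoopB (f : Int → PySem.Dict (Int × Int) (Option (List Int)) → Option (List Int) × PySem.Dict (Int × Int) (Option (List Int)))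
    (c : List Int) (z : Int) (memo : PySem.Dict (Int × Int) (Option (List Int))) :
    List Int → Option (List Int) × PySem.Dict (Int × Int) (Option (List Int))
  | [] => (none, memo)
  | w :: ws =>
    let z_next :=
      if w = PySem.Int.mod z 26 + PySem.List.pyGetD c 1 0 then
        PySem.Int.floordiv z (PySem.List.pyGetD c 0 0)
      else
        26 * PySem.Int.floordiv z (PySem.List.pyGetD c 0 0) + w + PySem.List.pyGetD c 2 0
    let tm := f z_next memo
    match tm.1 with
    | some t => (some (w :: t), tm.2)
    | none => fmnLoopB f c z tm.2 ws

-- solve(i, z) of B, on the suffix of constants starting at index i, threading the memo dict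
def fmnSolveB (rem : List (List Int)) (i : Int) (z : Int)
    (memo : PySem.Dict (Int × Int) (Option (List Int))) :
    Option (List Int) × PySem.Dict (Int × Int) (Option (List Int)) :=
  match rem with
  | [] => (if z = 0 then some [] else none, memo)
  | c :: rest =>
    match memo.get? (i, z) with
    | some r => (r, memo)
    | none =>
      let rm :=
        if PySem.List.pyGetD c 0 0 = 26 then
          let w := PySem.Int.mod z 26 + PySem.List.pyGetD c 1 0
          if w ≤ 0 ∨ 10 ≤ w then (none, memo)
          else
            let tm := fmnSolveB rest (i + 1) (PySem.Int.floordiv z (PySem.List.pyGetD c 0 0)) memo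
            (tm.1.map (fun t => w :: t), tm.2)
        else
          -- for w in range(9, 0, -1): …
          fmnLoopB (fun z' m' => fmnSolveB rest (i + 1) z' m') c z memo (PySem.List.pyRange 9 0 (-1))
      (rm.1, rm.2.insert (i, z) rm.1)

def find_model_number_alt (constants : List (List Int)) (z_prev : Int) (model_number : List Int) : Option (List Int) :=
  match (fmnSolveB constants 0 z_prev PySem.Dict.empty).1 with
  | none => none
  | some suffix => some (model_number ++ suffix)

-- ===== PRECONDITION & SPEC =====
-- Pre_ excludes inputs containing a malformed step (fewer than 3 constants without leading 26, or a
-- zero divisor in front), on which A raises IndexError/ZeroDivisionError when the search reaches that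
-- step; on a few such inputs the search is pruned before the bad step and A still returns (see cites).
def Pre_find_model_number (constants : List (List Int)) (z_prev : Int) (model_number : List Int) : Prop :=
  ∀ c ∈ constants, (c.headI = 26 ∧ 2 ≤ c.length) ∨ (c.headI ≠ 0 ∧ 3 ≤ c.length)
instance (constants : List (List Int)) (z_prev : Int) (model_number : List Int) : Decidable (Pre_find_model_number constants z_prev model_number) := by unfold Pre_find_model_number; infer_instance

def pvWitness_find_model_number : List (List Int) × Int × List Int := ([[1, 5, 3]], 0, [])

def Spec_find_model_number (constants : List (List Int)) (z_prev : Int) (model_number : List Int) (out : Option (List Int)) : Prop := out = find_model_number_alt constants z_prev model_number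
instance (constants : List (List Int)) (z_prev : Int) (model_number : List Int) (out : Option (List Int)) : Decidable (Spec_find_model_number constants z_prev model_number out) := by unfold Spec_find_model_number; infer_instance

-- ===== CLAIM (what is proved, stated in full; the proofs are below) =====
def Claim_equal_find_model_number : Prop := ∀ (constants : List (List Int)) (z_prev : Int) (model_number : List Int), Dom_find_model_number constants z_prev model_number → Pre_find_model_number constants z_prev model_number → Spec_find_model_number constants z_prev model_number (find_model_number constants z_prev model_number)

-- ===== LEMMAS AND PROOFS =====

-- A's accumulator is cosmetic: the result is the empty-accumulator result with the accumulator prepended.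
theorem fmnLoopA_acc (f : Int → List Int → Option (List Int))
    (hf : ∀ z mn, f z mn = (f z []).map (fun t => mn ++ t))
    (c : List Int) (z : Int) (mn : List Int) (ws : List Int) :
    fmnLoopA f c z mn ws = (fmnLoopA f c z [] ws).map (fun t => mn ++ t) := by
  induction ws with
  | nil => simp [fmnLoopA]
  | cons w ws ih =>
    simp only [fmnLoopA]
    rw [hf _ (mn ++ [w]), hf _ ([] ++ [w])]
    cases f (reduced_function z w c) [] <;> simp [ih]

theorem fmnA_acc (cs : List (List Int)) : ∀ (z : Int) (mn : List Int),
    find_model_number cs z mn = (find_model_number cs z []).map (fun t => mn ++ t) := by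
  induction cs with
  | nil => intro z mn; simp only [find_model_number]; split <;> simp
  | cons c rest ih =>
    intro z mn
    simp only [find_model_number]
    split
    · split
      · simp
      · rw [ih _ (mn ++ [_]), ih _ ([] ++ [_])]
        cases find_model_number rest (PySem.Int.floordiv z (PySem.List.pyGetD c 0 0)) [] <;> simp
    · exact fmnLoopA_acc _ ih c z mn _

-- every value stored in the memo is the (suffix-)search result of its key
def MemoInv (C : List (List Int)) (m : PySem.Dict (Int × Int) (Option (List Int))) : Prop :=
  ∀ i z r, m.get? (i, z) = some r → r = find_model_number (C.drop i.toNat) z []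

theorem memoInv_insert (C : List (List Int)) (m : PySem.Dict (Int × Int) (Option (List Int)))
    (i z : Int) (r : Option (List Int)) (hm : MemoInv C m)
    (hr : r = find_model_number (C.drop i.toNat) z []) : MemoInv C (m.insert (i, z) r) := by
  intro i' z' r' h
  rw [PySem.Dict.get?_insert] at h
  split at h
  · rename_i heq
    cases Prod.mk.injEq .. ▸ heq with
    | intro h1 h2 => subst h1; subst h2; cases h; exact hr
  · exact hm i' z' r' h

theorem memoInv_empty (C : List (List Int)) : MemoInv C PySem.Dict.empty := by
  intro i z r h
  simp [PySem.Dict.get?_empty] at h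

theorem fmnLoopB_correct (C rest : List (List Int)) (c : List Int) (z : Int)
    (f : Int → PySem.Dict (Int × Int) (Option (List Int)) → Option (List Int) × PySem.Dict (Int × Int) (Option (List Int)))
    (hf : ∀ z' m', MemoInv C m' → (f z' m').1 = find_model_number rest z' [] ∧ MemoInv C (f z' m').2) :
    ∀ (ws : List Int) (m : PySem.Dict (Int × Int) (Option (List Int))), MemoInv C m →
      (fmnLoopB f c z m ws).1 = fmnLoopA (fun z' mn' => find_model_number rest z' mn') c z [] ws ∧
      MemoInv C (fmnLoopB f c z m ws).2 := by
  intro ws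
  induction ws with
  | nil => intro m hm; exact ⟨by simp [fmnLoopB, fmnLoopA], by simpa [fmnLoopB] using hm⟩
  | cons w ws ih =>
    intro m hm
    have hred : (if w = PySem.Int.mod z 26 + PySem.List.pyGetD c 1 0 then
        PySem.Int.floordiv z (PySem.List.pyGetD c 0 0)
      else
        26 * PySem.Int.floordiv z (PySem.List.pyGetD c 0 0) + w + PySem.List.pyGetD c 2 0) =
        reduced_function z w c := rfl
    have hfz := hf (reduced_function z w c) m hm
    simp only [fmnLoopB, fmnLoopA, hred]
    rw [hfz.1, fmnA_acc rest _ ([] ++ [w])]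
    cases find_model_number rest (reduced_function z w c) [] with
    | some t => exact ⟨rfl, hfz.2⟩
    | none => simpa using ih (f (reduced_function z w c) m).2 hfz.2

theorem fmnSolveB_correct (C rem : List (List Int)) :
    ∀ (i z : Int) (m : PySem.Dict (Int × Int) (Option (List Int))),
      0 ≤ i → rem = C.drop i.toNat → MemoInv C m →
      (fmnSolveB rem i z m).1 = find_model_number rem z [] ∧ MemoInv C (fmnSolveB rem i z m).2 := by
  induction rem with
  | nil =>
    intro i z m _ _ hm
    exact ⟨by simp [fmnSolveB, find_model_number], by simpa [fmnSolveB] using hm⟩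
  | cons c rest ih =>
    intro i z m hi hrem hm
    have hrest : rest = C.drop (i + 1).toNat := by
      have h1 : (i + 1).toNat = i.toNat + 1 := by omega
      rw [h1, ← List.tail_drop, ← hrem]
      rfl
    simp only [fmnSolveB]
    cases hget : m.get? (i, z) with
    | some r =>
      refine ⟨?_, hm⟩
      have := hm i z r hget
      rw [this, ← hrem]
    | none =>
      by_cases h26 : PySem.List.pyGetD c 0 0 = 26
      · by_cases hw : PySem.Int.mod z 26 + PySem.List.pyGetD c 1 0 ≤ 0 ∨
            10 ≤ PySem.Int.mod z 26 + PySem.List.pyGetD c 1 0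
        · have hA : find_model_number (c :: rest) z [] = none := by
            simp only [find_model_number]
            rw [if_pos h26]
            exact if_pos hw
          rw [if_pos h26, if_pos hw, hA]
          exact ⟨rfl, memoInv_insert C m i z none hm (by rw [← hrem, hA])⟩
        · have ihs := ih (i + 1) (PySem.Int.floordiv z (PySem.List.pyGetD c 0 0)) m
            (by omega) hrest hm
          have hA : find_model_number (c :: rest) z [] =
              (fmnSolveB rest (i + 1) (PySem.Int.floordiv z (PySem.List.pyGetD c 0 0)) m).1.map
                (fun t => (PySem.Int.mod z 26 + PySem.List.pyGetD c 1 0) :: t) := by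
            rw [ihs.1]
            simp only [find_model_number]
            rw [if_pos h26, if_neg hw, fmnA_acc rest _ ([] ++ [_])]
            cases find_model_number rest (PySem.Int.floordiv z (PySem.List.pyGetD c 0 0)) [] <;> simp
          rw [if_pos h26, if_neg hw]
          exact ⟨hA.symm, memoInv_insert C _ i z _ ihs.2 (by rw [← hrem, hA])⟩
      · have hws : PySem.List.pyRange 9 0 (-1) = (PySem.List.pyRange 1 10 1).reverse := by decide
        have hloop := fmnLoopB_correct C rest c z (fun z' m' => fmnSolveB rest (i + 1) z' m')
          (fun z' m' hm' => ih (i + 1) z' m' (by omega) hrest hm')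
          (PySem.List.pyRange 9 0 (-1)) m hm
        have hA : find_model_number (c :: rest) z [] =
            (fmnLoopB (fun z' m' => fmnSolveB rest (i + 1) z' m') c z m (PySem.List.pyRange 9 0 (-1))).1 := by
          rw [hloop.1, hws]
          simp only [find_model_number]
          rw [if_neg h26]
        rw [if_neg h26]
        exact ⟨hA.symm, memoInv_insert C _ i z _ hloop.2 (by rw [← hrem, hA])⟩

-- ===== VERDICT (by name: the statement is the Claim_ definition above) =====
theorem find_model_number_spec : Claim_equal_find_model_number := by
  intro constants z_prev model_number _dom _pre
  unfold Spec_find_model_number find_model_number_alt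
  have h := (fmnSolveB_correct constants constants 0 z_prev PySem.Dict.empty le_rfl (by simp)
    (memoInv_empty constants)).1
  rw [h, fmnA_acc constants z_prev model_number]
  cases find_model_number constants z_prev [] <;> simp
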